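-- pv_equiv track=rewrite | github.com/catcd/MASS | dataset/dataset.py | reverse_sdp
-- ===== SOURCE A (Python) =====
-- def reverse_sdp(sdp):
--     if sdp:
--         nodes = sdp.split()
--         if len(nodes) % 2:
--             ret = []
--             for i, node in enumerate(nodes[::-1]):
--                 if i % 2:
--                     rev_dep = '({}_{})'.format(
--                         'r' if node[1] == 'l' else 'l',
--                         node[3:-1]
--                     )
--                     ret.append(rev_dep)
--                 else:
--                     ret.append(node)
--
--             return ' '.join(ret)
--         else:
--             raise ValueError('Invalid sdp')
--     else:
--         return ''
-- ===== SOURCE B (Python) =====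
-- def reverse_sdp(sdp):
--     if not sdp:
--         return ''
--     toks = sdp.split()
--     if len(toks) % 2 == 0:
--         raise ValueError('Invalid sdp')
--     # stage 1: two streams — nodes and relations
--     nodes = toks[0::2]
--     # stage 2: flip every relation
--     flipped = ['({}_{})'.format('r' if r[1] == 'l' else 'l', r[3:-1]) for r in toks[1::2]]
--     # stage 3: interleave the reversed streams (zip drops the extra node), then the first node
--     out = []
--     for n, f in zip(reversed(nodes), reversed(flipped)):
--         out.append(n)
--         out.append(f)
--     out.append(nodes[0])
--     return ' '.join(out)
-- ===== Notes on version B (the rewrite author's own statement) =====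
-- stated objective: alternative
-- what changed: B is staged stream processing: it splits the tokens into a node stream toks[0::2] and a relation stream toks[1::2], flips all relations in a separate comprehension pass, then interleaves the two reversed streams with zip (which drops the surplus node) and appends the first node; A instead makes one pass over the reversed full token list with an index-parity branch.
import Mathlib
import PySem

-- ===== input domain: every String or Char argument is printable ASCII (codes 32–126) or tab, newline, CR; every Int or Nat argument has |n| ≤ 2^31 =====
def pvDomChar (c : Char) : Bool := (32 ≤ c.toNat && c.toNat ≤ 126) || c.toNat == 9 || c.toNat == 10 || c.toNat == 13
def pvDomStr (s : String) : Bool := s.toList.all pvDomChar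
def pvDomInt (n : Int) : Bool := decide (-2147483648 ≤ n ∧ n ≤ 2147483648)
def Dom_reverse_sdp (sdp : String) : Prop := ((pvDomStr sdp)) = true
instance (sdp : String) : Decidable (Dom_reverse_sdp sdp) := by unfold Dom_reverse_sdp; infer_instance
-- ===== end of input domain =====

-- B replaces A's single reversed parity-branched pass by staged stream processing (split into a
-- node stream and a relation stream, flip the relations, interleave the reversed streams);
-- same return value on Pre_ (objective: alternative).

-- ===== PORT A =====
-- '({}_{})'.format('r' if node[1] == 'l' else 'l', node[3:-1])
def pvFlipA (node : String) : String :=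
  "(" ++ (if PySem.Str.pyGet? node 1 = some 'l' then "r" else "l") ++ "_"
    ++ PySem.Str.slice node (some 3) (some (-1)) ++ ")"

def reverse_sdp (sdp : String) : String :=
  if sdp ≠ "" then
    let nodes := PySem.Str.split₀ sdp
    if nodes.length % 2 = 1 then
      let ret := (PySem.List.enumerate nodes.reverse 0).foldl
        (fun acc p => if PySem.Int.mod p.1 2 ≠ 0 then acc ++ [pvFlipA p.2] else acc ++ [p.2]) []
      PySem.Str.join " " ret
    else ""  -- Python raises ValueError('Invalid sdp') here; excluded by Pre_
  else ""

-- ===== PORT B =====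
def pvFlipB (rel : String) : String :=
  "(" ++ (if PySem.Str.pyGet? rel 1 = some 'l' then "r" else "l") ++ "_"
    ++ PySem.Str.slice rel (some 3) (some (-1)) ++ ")"

-- hand port of the step-2 slice toks[0::2] (exact: every second element from index 0)
def pvStep2 (l : List String) : List String :=
  match l with
  | [] => []
  | x :: rest => x :: pvStep2 (rest.drop 1)
termination_by l.length
decreasing_by simp

def reverse_sdp_alt (sdp : String) : String :=
  if sdp = "" then ""
  else
    let toks := PySem.Str.split₀ sdp
    if toks.length % 2 = 0 then ""  -- Python raises ValueError('Invalid sdp') here; excluded by Pre_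
    else
      let nodes := pvStep2 toks                       -- toks[0::2]
      let flipped := (pvStep2 (toks.drop 1)).map pvFlipB  -- [flip r for r in toks[1::2]]
      let out := (nodes.reverse.zip flipped.reverse).foldl
        (fun acc p => acc ++ [p.1, p.2]) []
      PySem.Str.join " " (out ++ [PySem.List.pyGetD nodes 0 ""])

-- ===== PRECONDITION & SPEC =====
-- Pre_ admits exactly the inputs where the Python A returns: it excludes a non-empty sdp whose
-- token count is even (A raises ValueError) and one with a length-1 token at an odd position
-- (node[1] raises IndexError).
def Pre_reverse_sdp (sdp : String) : Prop :=
  sdp = "" ∨ ((PySem.Str.split₀ sdp).length % 2 = 1 ∧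
    ∀ k, k < (PySem.Str.split₀ sdp).length → k % 2 = 1 →
      2 ≤ ((PySem.Str.split₀ sdp).getD k "").length)
instance (sdp : String) : Decidable (Pre_reverse_sdp sdp) := by unfold Pre_reverse_sdp; infer_instance

def pvWitness_reverse_sdp : String := "he (l_nsubj) ate (r_dobj) pizza"

def Spec_reverse_sdp (sdp : String) (out : String) : Prop := out = reverse_sdp_alt sdp
instance (sdp : String) (out : String) : Decidable (Spec_reverse_sdp sdp out) := by unfold Spec_reverse_sdp; infer_instance

-- ===== CLAIM (what is proved, stated in full; the proofs are below) =====
def Claim_equal_reverse_sdp : Prop := ∀ (sdp : String), Dom_reverse_sdp sdp → Pre_reverse_sdp sdp → Spec_reverse_sdp sdp (reverse_sdp sdp)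

-- ===== LEMMAS AND PROOFS =====

-- the common shape both versions produce: the reversed path with every relation token flipped
def pvSpec : List String → List String
  | [] => []
  | [t] => [t]
  | t :: r :: rest => pvSpec rest ++ [pvFlipA r, t]

theorem pvFlipB_eq : pvFlipB = pvFlipA := rfl

theorem pvStep2_nil : pvStep2 [] = [] := by simp only [pvStep2]
theorem pvStep2_cons (x : String) (rest : List String) :
    pvStep2 (x :: rest) = x :: pvStep2 (rest.drop 1) := by simp only [pvStep2]

-- zip drops a surplus trailing element on the left when the other stream is exhausted
theorem pvZipSnoc {a b : Type} (A : List a) (B : List b) (x : a) (h : A.length = B.length) :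
    (A ++ [x]).zip B = A.zip B := by
  conv_lhs => rw [← List.append_nil B]
  rw [List.zip_append h]
  simp

theorem pvStep2_length : ∀ l : List String, (pvStep2 l).length = (l.length + 1) / 2
  | [] => by rw [pvStep2_nil]; rfl
  | [x] => by rw [pvStep2_cons]; simp [pvStep2_nil]
  | x :: y :: rest => by
    rw [pvStep2_cons]
    simp only [List.drop_one, List.tail_cons, List.length_cons]
    rw [pvStep2_length rest]
    omega

-- A's enumerate fold is a mapIdx over the reversed token list
theorem pvA_fold (m : List String) (s : Nat) (acc : List String) :
    (PySem.List.enumerate m (s : Int)).foldl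
      (fun acc p => if PySem.Int.mod p.1 2 ≠ 0 then acc ++ [pvFlipA p.2] else acc ++ [p.2]) acc
    = acc ++ m.mapIdx (fun i x => if (s + i) % 2 = 1 then pvFlipA x else x) := by
  induction m generalizing s acc with
  | nil => simp [PySem.List.enumerate]
  | cons x xs ih =>
    simp only [PySem.List.enumerate_cons, List.foldl_cons]
    have hcast : (s : Int) + 1 = ((s + 1 : Nat) : Int) := by push_cast; ring
    rw [hcast, ih, List.mapIdx_cons]
    have hmod : PySem.Int.mod (s : Int) 2 = ((s % 2 : Nat) : Int) := PySem.Int.mod_natCast s 2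
    have hhead : (if PySem.Int.mod (s : Int) 2 ≠ 0 then acc ++ [pvFlipA x] else acc ++ [x])
        = acc ++ [if (s + 0) % 2 = 1 then pvFlipA x else x] := by
      by_cases h : s % 2 = 1
      · rw [if_pos (by rw [hmod, h]; decide), if_pos (by omega)]
      · rw [if_neg (by rw [hmod, (by omega : s % 2 = 0)]; decide), if_neg (by omega)]
    rw [hhead]
    have htail : (fun (i : Nat) (y : String) => if (s + 1 + i) % 2 = 1 then pvFlipA y else y)
        = (fun (i : Nat) (y : String) => if (s + (i + 1)) % 2 = 1 then pvFlipA y else y) := by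
      funext i y
      have harith : s + 1 + i = s + (i + 1) := by omega
      rw [harith]
    rw [htail]
    simp

-- the parity mapIdx of the reversed list is pvSpec (token count odd)
theorem pvA_spec : ∀ (l : List String), l.length % 2 = 1 →
    l.reverse.mapIdx (fun i x => if i % 2 = 1 then pvFlipA x else x) = pvSpec l
  | [], h => by simp at h
  | [t], _ => by simp [pvSpec]
  | t :: r :: rest, h => by
    have hodd : rest.length % 2 = 1 := by simp at h ⊢; omega
    have hrev : (t :: r :: rest).reverse = rest.reverse ++ [r, t] := by simp
    rw [hrev, List.mapIdx_append, pvA_spec rest hodd]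
    have h1 : (0 + rest.reverse.length) % 2 = 1 := by simp; omega
    have h2 : ¬ (1 + rest.reverse.length) % 2 = 1 := by simp; omega
    simp only [List.mapIdx_cons, List.mapIdx_nil, if_pos h1, if_neg h2, pvSpec]

-- B's interleaving of the reversed streams, followed by the first node, is pvSpec (token count odd)
theorem pvB_spec : ∀ (l : List String), l.length % 2 = 1 →
    ((pvStep2 l).reverse.zip (((pvStep2 (l.drop 1)).map pvFlipA).reverse)).flatMap
        (fun p => [p.1, p.2])
      ++ [(pvStep2 l).getD 0 ""] = pvSpec l
  | [], h => by simp at h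
  | [t], _ => by simp [pvStep2_cons, pvStep2_nil, pvSpec]
  | t :: r :: rest, h => by
    have hodd : rest.length % 2 = 1 := by simp at h ⊢; omega
    -- rest is odd-length, hence nonempty
    match rest, hodd with
    | hh :: rest2, hodd =>
    have hlen2 : rest2.length % 2 = 0 := by simp at hodd; omega
    -- unfold the streams one interleaving step
    have hE : pvStep2 (t :: r :: hh :: rest2) = t :: hh :: pvStep2 (rest2.drop 1) := by
      rw [pvStep2_cons]; simp only [List.drop_one, List.tail_cons]
      rw [pvStep2_cons]; simp
    have hR : pvStep2 ((t :: r :: hh :: rest2).drop 1) = r :: pvStep2 (rest2) := by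
      simp only [List.drop_one, List.tail_cons]
      rw [pvStep2_cons]; simp
    rw [hE, hR]
    have hlenA : (pvStep2 (rest2.drop 1)).reverse.length
        = ((pvStep2 rest2).map pvFlipA).reverse.length := by
      simp [pvStep2_length]
      omega
    -- IH for rest = hh :: rest2
    have ih := pvB_spec (hh :: rest2) hodd
    have hEr : pvStep2 (hh :: rest2) = hh :: pvStep2 (rest2.drop 1) := pvStep2_cons hh rest2
    have hRr : pvStep2 ((hh :: rest2).drop 1) = pvStep2 rest2 := by
      simp only [List.drop_one, List.tail_cons]
    rw [hEr, hRr] at ih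
    simp only [List.reverse_cons, List.getD_cons_zero] at ih
    rw [pvZipSnoc _ _ _ hlenA] at ih
    -- now the goal
    simp only [List.reverse_cons, List.map_cons, List.getD_cons_zero, pvSpec]
    rw [List.append_assoc (pvStep2 (rest2.drop 1)).reverse [hh] [t],
        List.zip_append hlenA]
    simp only [List.flatMap_append]
    rw [← ih]
    simp

-- ===== VERDICT (by name: the statement is the Claim_ definition above) =====
theorem reverse_sdp_spec : Claim_equal_reverse_sdp := by
  intro sdp _ hpre
  unfold Spec_reverse_sdp reverse_sdp reverse_sdp_alt
  rcases hpre with hempty | ⟨hodd, _⟩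
  · simp [hempty]
  · by_cases hne : sdp = ""
    · simp [hne]
    · simp only [hne, if_neg, ne_eq, not_false_eq_true, if_true, if_pos hodd,
        if_neg (by omega : ¬ (PySem.Str.split₀ sdp).length % 2 = 0)]
      set toks := PySem.Str.split₀ sdp with htoks
      congr 1
      -- A side
      have hA : (PySem.List.enumerate toks.reverse 0).foldl
          (fun acc p => if PySem.Int.mod p.1 2 ≠ 0 then acc ++ [pvFlipA p.2] else acc ++ [p.2]) []
          = pvSpec toks := by
        have hfold := pvA_fold toks.reverse 0 []
        simp only [Nat.cast_zero, Nat.zero_add, List.nil_append] at hfold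
        rw [hfold]
        exact pvA_spec toks hodd
      -- B side
      have hB : (((pvStep2 toks).reverse.zip (((pvStep2 (toks.drop 1)).map pvFlipB).reverse)).foldl
            (fun acc p => acc ++ [p.1, p.2]) [])
          ++ [PySem.List.pyGetD (pvStep2 toks) 0 ""] = pvSpec toks := by
        rw [pvFlipB_eq, PySem.List.pyGetD_zero]
        have hfl := PySem.List.foldl_append_eq_flatMap (fun p : String × String => [p.1, p.2])
          ((pvStep2 toks).reverse.zip (((pvStep2 (toks.drop 1)).map pvFlipA).reverse)) []
        rw [hfl, List.nil_append]
        exact pvB_spec toks hodd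
      rw [hA, ← hB]
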